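-- pv_equiv track=rewrite | github.com/auto9suns/model_api_connection | cli/llm_stats.py | _parse_filter
-- ===== SOURCE A (Python) =====
-- def _parse_filter(specs: list[str]) -> list[tuple[str, str, str]]:
--     """['provider=openai', 'caller~foo'] -> [(key, op, val), ...]."""
--     out = []
--     for spec in specs:
--         eq_pos = spec.find("=")
--         tilde_pos = spec.find("~")
--         if eq_pos == -1 and tilde_pos == -1:
--             raise ValueError(f"invalid --filter: {spec!r} (use key=val or key~val)")
--         if tilde_pos != -1 and (eq_pos == -1 or tilde_pos < eq_pos):
--             k, v = spec.split("~", 1)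
--             out.append((k.strip(), "~", v.strip()))
--         else:
--             k, v = spec.split("=", 1)
--             out.append((k.strip(), "=", v.strip()))
--     return out
-- ===== SOURCE B (Python) =====
-- import re
--
-- _FILTER_RE = re.compile(r"([^=~]*)([=~])(.*)", re.DOTALL)
--
--
-- def _parse_filter(specs: list[str]) -> list[tuple[str, str, str]]:
--     """['provider=openai', 'caller~foo'] -> [(key, op, val), ...]."""
--     out = []
--     for spec in specs:
--         m = _FILTER_RE.match(spec)
--         if m is None:
--             raise ValueError(f"invalid --filter: {spec!r} (use key=val or key~val)")
--         out.append((m.group(1).strip(), m.group(2), m.group(3).strip()))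
--     return out
-- ===== Notes on version B (the rewrite author's own statement) =====
-- stated objective: idiomatic
-- what changed: Replaces the two find() scans, the position-comparison branch and the split(op, 1) call with a single pre-compiled regex ([^=~]*)([=~])(.*) whose first group naturally stops at the earliest operator, yielding key/op/value in one match.
import Mathlib
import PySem

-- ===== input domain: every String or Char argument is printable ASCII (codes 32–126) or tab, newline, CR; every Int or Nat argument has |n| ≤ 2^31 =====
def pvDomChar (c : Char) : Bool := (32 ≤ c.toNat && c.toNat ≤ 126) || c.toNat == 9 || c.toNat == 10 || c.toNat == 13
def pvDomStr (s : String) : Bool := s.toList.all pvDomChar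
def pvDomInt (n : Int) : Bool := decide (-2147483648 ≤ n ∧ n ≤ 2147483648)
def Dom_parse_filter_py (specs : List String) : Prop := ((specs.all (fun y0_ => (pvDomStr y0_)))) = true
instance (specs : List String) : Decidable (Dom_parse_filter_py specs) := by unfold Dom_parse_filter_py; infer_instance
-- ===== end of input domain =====

-- B replaces A's two find() scans + position comparison + split(op, 1) by a single
-- first-operator match (a pre-compiled regex in Python): idiomatic, same cost.


-- ===== PORT A =====
-- loop body of A: find both operator positions, compare, split on the winner
def pvAStep (out : List (String × String × String)) (spec : String) : List (String × String × String) :=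
  let eqPos := PySem.Str.find spec "="
  let tildePos := PySem.Str.find spec "~"
  if eqPos = -1 ∧ tildePos = -1 then
    out  -- Python raises ValueError here; such specs are excluded by Pre_parse_filter_py
  else if tildePos ≠ -1 ∧ (eqPos = -1 ∨ tildePos < eqPos) then
    match PySem.Str.splitMax? spec "~" 1 with
    | some [k, v] => out ++ [(PySem.Str.strip k, "~", PySem.Str.strip v)]
    | _ => out  -- unreachable: '~' occurs in spec, so the split has exactly two parts
  else
    match PySem.Str.splitMax? spec "=" 1 with
    | some [k, v] => out ++ [(PySem.Str.strip k, "=", PySem.Str.strip v)]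
    | _ => out  -- unreachable: '=' occurs in spec in this branch

def parse_filter_py (specs : List String) : List (String × String × String) :=
  specs.foldl pvAStep []

-- ===== PORT B =====
-- loop body of B: `re.match(r"([^=~]*)([=~])(.*)", spec, re.DOTALL)` — group 1 is the
-- maximal operator-free prefix, group 2 the first operator, group 3 the rest; the match
-- fails iff spec has no operator. This transcription is exact for this pattern.
def pvBStep (out : List (String × String × String)) (spec : String) : List (String × String × String) :=
  let cs := spec.toList
  let key := cs.takeWhile (fun c => !(c == '=' || c == '~'))
  match cs.drop key.length with
  | op :: rest =>
      out ++ [(PySem.Str.strip (String.ofList key), String.ofList [op], PySem.Str.strip (String.ofList rest))]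
  | [] => out  -- Python raises ValueError here; excluded by Pre_parse_filter_py

def parse_filter_py_alt (specs : List String) : List (String × String × String) :=
  specs.foldl pvBStep []

-- ===== PRECONDITION & SPEC =====
-- Pre_ excludes exactly the inputs where the Python (both A and B) raises ValueError:
-- some spec contains neither '=' nor '~'.
def Pre_parse_filter_py (specs : List String) : Prop :=
  ∀ spec ∈ specs, PySem.Str.isIn "=" spec = true ∨ PySem.Str.isIn "~" spec = true
instance (specs : List String) : Decidable (Pre_parse_filter_py specs) := by unfold Pre_parse_filter_py; infer_instance

def pvWitness_parse_filter_py : List String := ["provider=openai", "caller~foo", " k = v "]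

def Spec_parse_filter_py (specs : List String) (out : List (String × String × String)) : Prop := out = parse_filter_py_alt specs
instance (specs : List String) (out : List (String × String × String)) : Decidable (Spec_parse_filter_py specs out) := by unfold Spec_parse_filter_py; infer_instance

-- ===== CLAIM (what is proved, stated in full; the proofs are below) =====
def Claim_equal_parse_filter_py : Prop := ∀ (specs : List String), Dom_parse_filter_py specs → Pre_parse_filter_py specs → Spec_parse_filter_py specs (parse_filter_py specs)

-- ===== LEMMAS AND PROOFS =====

-- s.find(single operator char) located via the maximal operator-free prefix
theorem pv_find_go (b : Char) : ∀ (cs : List Char) (k : Nat),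
    PySem.Chars.find.go [b] cs k =
      if b ∈ cs then ((k + (cs.takeWhile (fun c => c != b)).length : Nat) : Int) else -1 := by
  intro cs
  induction cs with
  | nil => intro k; simp [PySem.Chars.find.go]
  | cons c t ih =>
    intro k
    rw [PySem.Chars.find.go.eq_2]
    by_cases hc : c = b
    · subst hc; simp [List.isPrefixOf]
    · simp [List.isPrefixOf, hc, Ne.symm hc, ih (k + 1), bne_iff_ne]
      split_ifs
      · omega
      · rfl

theorem pv_find (b : Char) (cs : List Char) :
    PySem.Chars.find cs [b] =
      if b ∈ cs then (((cs.takeWhile (fun c => c != b)).length : Nat) : Int) else -1 := by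
  simpa using pv_find_go b cs 0

-- the split loop once maxsplit is exhausted
theorem pv_split_go0 (a : Char) : ∀ (fuel : Nat) (cs cur : List Char) (acc : List (List Char)),
    PySem.Chars.splitOnMax.go [a] fuel 0 cs cur acc = ((cur.reverse ++ cs) :: acc).reverse := by
  intro fuel cs cur acc
  rw [PySem.Chars.splitOnMax.go.eq_def]
  rcases fuel with _ | f <;> rcases cs with _ | ⟨c, r⟩ <;> simp

-- s.split(op, 1) cuts at the first occurrence of the (present) operator char
theorem pv_split_go1 (a : Char) : ∀ (cs : List Char) (fuel : Nat) (cur : List Char) (acc : List (List Char)),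
    a ∈ cs → cs.length < fuel →
    PySem.Chars.splitOnMax.go [a] fuel 1 cs cur acc =
      acc.reverse ++ [cur.reverse ++ cs.takeWhile (fun c => c != a),
                      cs.drop ((cs.takeWhile (fun c => c != a)).length + 1)] := by
  intro cs
  induction cs with
  | nil => intro fuel cur acc h; simp at h
  | cons c r ih =>
    intro fuel cur acc hmem hlen
    rcases fuel with _ | f
    · omega
    rw [PySem.Chars.splitOnMax.go.eq_def]
    by_cases hc : a = c
    · subst hc
      simp [List.isPrefixOf, pv_split_go0]
    · have hmem' : a ∈ r := by rcases hmem with h | h; exact absurd rfl hc; assumption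
      simp only [List.isPrefixOf, Bool.and_true, List.length_cons] at *
      simp [hc, Ne.symm hc, ih f (c :: cur) acc hmem' (by omega), bne_iff_ne]

theorem pv_split1 (a : Char) (cs : List Char) (h : a ∈ cs) :
    PySem.Chars.splitOnMax cs [a] 1 =
      [cs.takeWhile (fun c => c != a), cs.drop ((cs.takeWhile (fun c => c != a)).length + 1)] := by
  unfold PySem.Chars.splitOnMax
  rw [if_neg (by norm_num)]
  simpa using pv_split_go1 a cs (cs.length + 1) [] [] h (by omega)

theorem pv_takeWhile_append (q : Char → Bool) (l1 l2 : List Char) (h : ∀ c ∈ l1, q c = true) :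
    (l1 ++ l2).takeWhile q = l1 ++ l2.takeWhile q := by
  induction l1 with
  | nil => simp
  | cons c t ih =>
    simp [h c (by simp), ih (fun x hx => h x (by simp [hx]))]

-- the two loop bodies agree on every spec
theorem pv_step (out : List (String × String × String)) (spec : String) :
    pvAStep out spec = pvBStep out spec := by
  unfold pvAStep pvBStep
  simp only [PySem.Str.find, PySem.Str.splitMax?, PySem.Chars.splitMax?, PySem.Str.strip]
  have hE : ("=" : String).toList = ['='] := by decide
  have hT : ("~" : String).toList = ['~'] := by decide
  simp only [hE, hT]
  set cs := spec.toList with hcs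
  set p : Char → Bool := fun c => !(c == '=' || c == '~') with hp
  have hdec : cs.takeWhile p ++ cs.dropWhile p = cs := List.takeWhile_append_dropWhile
  have htwmem : ∀ c ∈ cs.takeWhile p, p c = true := fun c hc => List.mem_takeWhile_imp hc
  cases hdw : cs.dropWhile p with
  | nil =>
      have hall : ∀ c ∈ cs, p c = true := List.dropWhile_eq_nil_iff.mp hdw
      have hne : '=' ∉ cs := fun h => by simpa [hp] using hall _ h
      have hnt : '~' ∉ cs := fun h => by simpa [hp] using hall _ h
      have htw : cs.takeWhile p = cs := List.takeWhile_eq_self_iff.mpr hall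
      rw [pv_find '=' cs, pv_find '~' cs, if_neg hne, if_neg hnt, htw]
      simp
  | cons a r =>
      have hpa : p a = false := by
        have h0 : 0 < (cs.dropWhile p).length := by rw [hdw]; simp
        have := List.dropWhile_get_zero_not p cs h0
        simpa [hdw] using Bool.not_eq_true _ ▸ (by simpa [hdw] using this)
      have hcase : a = '=' ∨ a = '~' := by
        by_cases h1 : a = '='
        · exact Or.inl h1
        · by_cases h2 : a = '~'
          · exact Or.inr h2
          · simp [hp, h1, h2] at hpa
      have hkey : cs.drop (cs.takeWhile p).length = a :: r := by
        have h2 : (cs.takeWhile p ++ cs.dropWhile p).drop (cs.takeWhile p).length = cs.dropWhile p :=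
          List.drop_left
        rw [hdec, hdw] at h2
        exact h2
      have hcseq : cs = cs.takeWhile p ++ a :: r := by rw [← hdw, hdec]
      have hkey2 : cs.drop ((cs.takeWhile p).length + 1) = r := by
        have h4 : ((cs.takeWhile p ++ [a]) ++ r).drop ((cs.takeWhile p ++ [a]).length) = r :=
          List.drop_left
        have h5 : (cs.takeWhile p ++ [a]) ++ r = cs := by
          rw [List.append_assoc, List.singleton_append, ← hcseq]
        rw [h5] at h4
        simpa using h4
      rcases hcase with ha | ha
      · -- first operator is '='
        subst ha
        have htwmem' : ∀ c ∈ cs.takeWhile p, (c != '=') = true := fun c hc => by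
          have := htwmem c hc; simp [hp] at this; simp [this.1]
        have hemem : '=' ∈ cs := by rw [hcseq]; simp
        have htwe : cs.takeWhile (fun c => c != '=') = cs.takeWhile p := by
          conv_lhs => rw [hcseq]
          rw [pv_takeWhile_append _ _ _ htwmem']
          simp
        rw [pv_find '=' cs, if_pos hemem, htwe]
        rw [pv_find '~' cs]
        by_cases hte : '~' ∈ cs
        · have : cs.takeWhile (fun c => c != '~') = cs.takeWhile p ++ '=' :: r.takeWhile (fun c => c != '~') := by
            conv_lhs => rw [hcseq]
            rw [pv_takeWhile_append _ _ _ (fun c hc => by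
              have := htwmem c hc; simp [hp] at this; simp [this.2])]
            simp
          rw [if_pos hte, this]
          rw [if_neg (by simp only [List.length_append, List.length_cons]; push_cast; try simp; try omega)]
          rw [if_neg (by simp only [List.length_append, List.length_cons]; push_cast; try simp; try omega)]
          rw [pv_split1 '=' cs hemem, htwe, hkey]
          simp [hkey2]
        · rw [if_neg hte]
          rw [if_neg (by push_cast; try simp; try omega)]
          rw [if_neg (by push_cast; try simp; try omega)]
          rw [pv_split1 '=' cs hemem, htwe, hkey]
          simp [hkey2]
      · -- first operator is '~'
        subst ha
        have htwmem' : ∀ c ∈ cs.takeWhile p, (c != '~') = true := fun c hc => by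
          have := htwmem c hc; simp [hp] at this; simp [this.2]
        have htmem : '~' ∈ cs := by rw [hcseq]; simp
        have htwt : cs.takeWhile (fun c => c != '~') = cs.takeWhile p := by
          conv_lhs => rw [hcseq]
          rw [pv_takeWhile_append _ _ _ htwmem']
          simp
        rw [pv_find '~' cs, if_pos htmem, htwt]
        rw [pv_find '=' cs]
        by_cases hee : '=' ∈ cs
        · have : cs.takeWhile (fun c => c != '=') = cs.takeWhile p ++ '~' :: r.takeWhile (fun c => c != '=') := by
            conv_lhs => rw [hcseq]
            rw [pv_takeWhile_append _ _ _ (fun c hc => by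
              have := htwmem c hc; simp [hp] at this; simp [this.1])]
            simp
          rw [if_pos hee, this]
          rw [if_neg (by simp only [List.length_append, List.length_cons]; push_cast; try simp; try omega)]
          rw [if_pos (by simp only [List.length_append, List.length_cons]; push_cast; try simp; try omega)]
          rw [pv_split1 '~' cs htmem, htwt, hkey]
          simp [hkey2]
        · rw [if_neg hee]
          rw [if_neg (by push_cast; try simp; try omega)]
          rw [if_pos (by push_cast; try simp; try omega)]
          rw [pv_split1 '~' cs htmem, htwt, hkey]
          simp [hkey2]

-- ===== VERDICT (by name: the statement is the Claim_ definition above) =====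
theorem parse_filter_py_spec : Claim_equal_parse_filter_py := by
  intro specs _ _
  unfold Spec_parse_filter_py parse_filter_py parse_filter_py_alt
  have h : pvAStep = pvBStep := funext fun out => funext fun spec => pv_step out spec
  rw [h]
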